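-- pv_equiv track=rewrite | github.com/Prantik-1811/Regional_chatbot_server | main.py | score_sentence
-- ===== SOURCE A (Python) =====
-- from collections import Counter
-- from typing import List, Optional
--
-- def score_sentence(query_tokens: List[str], sentence_tokens: List[str]) -> int:
--     """Score = overlap count between query and sentence tokens."""
--     if not sentence_tokens:
--         return 0
--     sentence_counts = Counter(sentence_tokens)
--     score = 0
--     for qt in query_tokens:
--         score += sentence_counts.get(qt, 0)
--     return score
-- ===== SOURCE B (Python) =====
-- def score_sentence(query_tokens, sentence_tokens):
--     """Score = overlap count between query and sentence tokens."""
--     score = 0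
--     seen = set()
--     for qt in query_tokens:
--         if qt not in seen:
--             seen.add(qt)
--             score += query_tokens.count(qt) * sentence_tokens.count(qt)
--     return score
-- ===== Notes on version B (the rewrite author's own statement) =====
-- stated objective: alternative
-- what changed: Replaces A's per-occurrence Counter lookups with a grouped computation: B visits each DISTINCT query token once (tracked in a seen-set) and adds the product count(query,t)*count(sentence,t), so the score is assembled as a sum of multiplicities products over distinct tokens instead of one lookup per query occurrence.
import Mathlib
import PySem

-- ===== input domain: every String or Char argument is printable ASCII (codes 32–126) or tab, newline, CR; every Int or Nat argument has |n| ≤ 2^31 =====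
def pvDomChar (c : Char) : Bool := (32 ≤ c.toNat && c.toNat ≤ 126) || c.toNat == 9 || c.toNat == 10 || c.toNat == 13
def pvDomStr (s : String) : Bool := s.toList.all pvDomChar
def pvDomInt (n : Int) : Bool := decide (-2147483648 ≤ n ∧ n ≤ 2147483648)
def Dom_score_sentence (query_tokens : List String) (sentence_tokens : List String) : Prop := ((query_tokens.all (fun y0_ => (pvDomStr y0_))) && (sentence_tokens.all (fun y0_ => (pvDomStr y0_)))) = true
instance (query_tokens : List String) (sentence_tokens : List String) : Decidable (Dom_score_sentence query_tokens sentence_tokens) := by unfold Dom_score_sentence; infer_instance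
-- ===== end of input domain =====

-- B restructures A: instead of a Counter lookup per query occurrence, B visits each distinct query token once (seen-set) and adds count(query,t)*count(sentence,t) (alternative decomposition, not faster).


-- ===== PORT A =====
-- literal port of A: early return on empty sentence, else Counter then a fold adding dict lookups
def score_sentence (query_tokens : List String) (sentence_tokens : List String) : Int :=
  if sentence_tokens = [] then 0
  else
    let sentence_counts := PySem.Dict.counter sentence_tokens
    query_tokens.foldl (fun score qt => score + sentence_counts.getD qt 0) 0

-- ===== PORT B =====
-- B: loop over query tokens with a seen-set; each distinct token contributes count(q,t)*count(s,t) once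
def score_sentence_alt (query_tokens : List String) (sentence_tokens : List String) : Int :=
  (query_tokens.foldl
    (fun (st : Int × PySem.Set String) qt =>
      if PySem.Set.contains st.2 qt then st
      else (st.1 + (PySem.List.count query_tokens qt : Int) * (PySem.List.count sentence_tokens qt : Int),
            PySem.Set.add st.2 qt))
    (0, PySem.Set.empty)).1

-- ===== PRECONDITION & SPEC =====
def Spec_score_sentence (query_tokens : List String) (sentence_tokens : List String) (out : Int) : Prop := out = score_sentence_alt query_tokens sentence_tokens
instance (query_tokens : List String) (sentence_tokens : List String) (out : Int) : Decidable (Spec_score_sentence query_tokens sentence_tokens out) := by unfold Spec_score_sentence; infer_instance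

-- ===== CLAIM (what is proved, stated in full; the proofs are below) =====
def Claim_equal_score_sentence : Prop := ∀ (query_tokens : List String) (sentence_tokens : List String), Dom_score_sentence query_tokens sentence_tokens → Spec_score_sentence query_tokens sentence_tokens (score_sentence query_tokens sentence_tokens)

-- ===== LEMMAS AND PROOFS =====

-- A's fold equals the plain sum of sentence-counts over query tokens
theorem fold_eq_sum (q s : List String) (acc : Int) :
    q.foldl (fun score qt => score + (PySem.Dict.counter s).getD qt 0) acc =
      acc + (q.map (fun qt => (List.count qt s : Int))).sum := by
  induction q generalizing acc with
  | nil => simp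
  | cons h t ih =>
    rw [List.foldl_cons, ih, List.map_cons, List.sum_cons, PySem.Dict.getD_counter]
    ring

-- pulling the total contribution of one token a out of a seen-masked sum
theorem sum_mask_split (f : String → Int) (a : String) (seen : List String) :
    ∀ (as : List String),
      (as.map (fun t => if t ∈ seen then 0 else f t)).sum =
      (if a ∈ seen then 0 else (List.count a as : Int) * f a) +
      (as.map (fun t => if t ∈ seen ∨ t = a then 0 else f t)).sum := by
  intro as
  induction as with
  | nil => simp
  | cons b bs ih =>
    rw [List.map_cons, List.sum_cons, List.map_cons, List.sum_cons, ih, List.count_cons]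
    by_cases hba : b = a
    · subst hba
      by_cases hb : b ∈ seen
      · simp [hb]
      · simp [hb]
        ring
    · by_cases hb : b ∈ seen
      · simp [hb, hba]
      · simp [hb, hba]
        split_ifs with h
        · ring
        · ring

-- B's seen-set fold invariant: if the remaining suffix carries all outstanding occurrences
-- of unseen tokens, the fold adds the seen-masked sum of sentence-counts over the suffix.
theorem alt_fold_invariant (q s : List String) :
    ∀ (rem : List String) (seen : PySem.Set String) (sc : Int),
      (∀ t, t ∉ seen → List.count t q = List.count t rem) →
      (rem.foldl
        (fun (st : Int × PySem.Set String) qt =>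
          if PySem.Set.contains st.2 qt then st
          else (st.1 + (PySem.List.count q qt : Int) * (PySem.List.count s qt : Int),
                PySem.Set.add st.2 qt))
        (sc, seen)).1 =
      sc + (rem.map (fun t => if t ∈ seen then 0 else (List.count t s : Int))).sum := by
  intro rem
  induction rem with
  | nil => intro seen sc H; simp
  | cons a as ih =>
    intro seen sc H
    rw [List.foldl_cons, List.map_cons, List.sum_cons]
    by_cases ha : a ∈ seen
    · have hc : PySem.Set.contains seen a = true := (PySem.Set.contains_iff seen a).mpr ha
      simp only [hc, if_true, ha]
      have H' : ∀ t, t ∉ seen → List.count t q = List.count t as := by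
        intro t ht
        have hq := H t ht
        have hta : a ≠ t := fun h => ht (h ▸ ha)
        rw [List.count_cons] at hq
        simpa [hta] using hq
      rw [ih seen sc H']
      ring
    · have hc : PySem.Set.contains seen a = false := by
        by_contra h
        exact ha ((PySem.Set.contains_iff seen a).mp (by revert h; cases (PySem.Set.contains seen a) <;> simp))
      simp only [hc, Bool.false_eq_true, if_false, ha]
      have H' : ∀ t, t ∉ PySem.Set.add seen a → List.count t q = List.count t as := by
        intro t ht
        rw [PySem.Set.mem_add] at ht
        push Not at ht
        have hq := H t ht.1
        have hta : a ≠ t := Ne.symm ht.2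
        rw [List.count_cons] at hq
        simpa [hta] using hq
      rw [ih (PySem.Set.add seen a) _ H']
      have hmask : as.map (fun t => if t ∈ PySem.Set.add seen a then 0 else (List.count t s : Int)) =
          as.map (fun t => if t ∈ seen ∨ t = a then 0 else (List.count t s : Int)) := by
        apply List.map_congr_left
        intro x _
        simp only [PySem.Set.mem_add]
      rw [hmask, sum_mask_split (fun t => (List.count t s : Int)) a seen as]
      have hqa : List.count a q = List.count a (a :: as) := H a ha
      rw [List.count_cons_self] at hqa
      simp only [PySem.List.count_eq, ha, if_false, hqa]
      push_cast
      ring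

-- grouped-by-distinct sum equals per-occurrence sum
theorem alt_eq_sum (q s : List String) :
    score_sentence_alt q s = (q.map (fun qt => (List.count qt s : Int))).sum := by
  unfold score_sentence_alt
  rw [alt_fold_invariant q s q PySem.Set.empty 0 (fun t _ => rfl)]
  have hmask : q.map (fun t => if t ∈ (PySem.Set.empty : PySem.Set String) then 0 else (List.count t s : Int)) =
      q.map (fun t => (List.count t s : Int)) := by
    apply List.map_congr_left
    intro x _
    simp [PySem.Set.empty]
  rw [hmask]
  simp

-- ===== VERDICT (by name: the statement is the Claim_ definition above) =====
theorem score_sentence_spec : Claim_equal_score_sentence := by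
  intro q s _
  unfold Spec_score_sentence
  rw [alt_eq_sum]
  unfold score_sentence
  split
  · next hemp => subst hemp; simp
  · simpa using fold_eq_sum q s 0
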